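-- pv_equiv track=rewrite | github.com/wxl19991003/gan-behavior | experiment/CN1_large.py | getsln
-- ===== SOURCE A (Python) =====
-- import copy
--
-- def getsln(trace, eventlist,datatraceindex):
--     sln = []
--     length = len(trace)
--     tag=0
--     l1 = []
--     for j in range(len(eventlist)):
--         l1.append(0)
--     for i in range(length+1):
--         if i != datatraceindex:
--             line = []
--             for j in range(len(eventlist)):
--                 line.append(0)
--             l = trace[:i + 1]
--             for e in eventlist:
--                 line[eventlist.index(e)] = l.count(e)
--             sln.append(line)
--         else:
--             if datatraceindex !=0:
--                 h=copy.deepcopy(l1)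
--                 sln.append(h)
--             else:
--                 sln.append(l1)
--             tag=1
--     l = []
--     lengthx=len(sln)
--     for j in range(len(eventlist)):
--         l.append(0)
--     for i in range(len(eventlist)-lengthx):
--         sln.append(l)
--     return sln
-- ===== SOURCE B (Python) =====
-- def getsln(trace, eventlist, datatraceindex):
--     m = len(eventlist)
--     # flag per column: True iff this position is the first occurrence of its event
--     flags = [e not in eventlist[:p] for p, e in enumerate(eventlist)]
--     cnt = {}
--     sln = []
--     for i in range(len(trace) + 1):
--         if i < len(trace):
--             e = trace[i]
--             cnt[e] = cnt.get(e, 0) + 1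
--         if i == datatraceindex:
--             sln.append([0] * m)
--         else:
--             sln.append([cnt.get(e, 0) if f else 0 for f, e in zip(flags, eventlist)])
--     sln += [[0] * m for _ in range(m - len(sln))]
--     return sln
-- ===== Notes on version B (the rewrite author's own statement) =====
-- stated objective: faster
-- what changed: A recounts every event over every prefix with list.count and rescans eventlist with list.index for each cell; B precomputes first-occurrence column flags once and sweeps the trace a single time with an incremental dict counter, emitting each prefix row from the running counts.
import Mathlib
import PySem

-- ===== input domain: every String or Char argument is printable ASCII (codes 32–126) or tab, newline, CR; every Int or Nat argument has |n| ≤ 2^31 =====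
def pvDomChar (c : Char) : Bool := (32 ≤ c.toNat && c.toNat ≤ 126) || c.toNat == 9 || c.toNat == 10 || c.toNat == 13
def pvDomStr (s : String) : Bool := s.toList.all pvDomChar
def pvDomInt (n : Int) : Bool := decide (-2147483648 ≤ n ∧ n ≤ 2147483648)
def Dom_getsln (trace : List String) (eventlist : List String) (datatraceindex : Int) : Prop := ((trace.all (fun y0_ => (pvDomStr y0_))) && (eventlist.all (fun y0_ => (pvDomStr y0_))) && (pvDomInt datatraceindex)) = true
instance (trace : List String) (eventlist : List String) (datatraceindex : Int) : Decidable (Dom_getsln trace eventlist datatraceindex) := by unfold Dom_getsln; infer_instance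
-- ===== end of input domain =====

-- B replaces A's per-prefix recount (list.count + list.index for every event and every prefix)
-- by one sweep over the trace with an incremental dict counter plus first-occurrence flags computed once.

-- ===== PORT A =====
-- literal port of A; copy.deepcopy only affects aliasing, not the returned value, so both
-- branches of the datatraceindex≠0 test append the same zero row l1.
def getsln (trace : List String) (eventlist : List String) (datatraceindex : Int) : List (List Int) :=
  let length := trace.length
  let l1 : List Int := (List.range eventlist.length).foldl (fun a _ => a ++ [(0 : Int)]) []
  let sln : List (List Int) :=
    (List.range (length + 1)).foldl
      (fun sln (i : Nat) =>
        if (i : Int) ≠ datatraceindex then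
          let line0 : List Int := (List.range eventlist.length).foldl (fun a _ => a ++ [(0 : Int)]) []
          let l := PySem.List.slice trace none (some ((i : Int) + 1))
          let line := eventlist.foldl
            (fun line e =>
              match PySem.List.index? eventlist e with
              | some k => line.set k ((PySem.List.count l e : Int))
              | none => line)   -- unreachable: e ∈ eventlist, Python's .index cannot raise here
            line0
          sln ++ [line]
        else
          sln ++ [l1]) []
  let l : List Int := (List.range eventlist.length).foldl (fun a _ => a ++ [(0 : Int)]) []
  sln ++ (List.range (eventlist.length - sln.length)).map (fun _ => l)

-- ===== PORT B =====
def getsln_alt (trace : List String) (eventlist : List String) (datatraceindex : Int) : List (List Int) :=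
  let m := eventlist.length
  let flags : List Bool := (PySem.List.enumerate eventlist).map
    (fun pe => !((PySem.List.slice eventlist none (some pe.1)).contains pe.2))
  let st : PySem.Dict String Int × List (List Int) :=
    (List.range (trace.length + 1)).foldl
      (fun st (i : Nat) =>
        let cnt := if i < trace.length then
            st.1.insert (trace.getD i "") (st.1.getD (trace.getD i "") 0 + 1)
          else st.1
        let row := if (i : Int) = datatraceindex then List.replicate m (0 : Int)
          else (flags.zip eventlist).map (fun fe => if fe.1 then cnt.getD fe.2 0 else 0)
        (cnt, st.2 ++ [row]))
      (PySem.Dict.empty, [])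
  st.2 ++ List.replicate (m - st.2.length) (List.replicate m 0)

-- ===== PRECONDITION & SPEC =====
def Spec_getsln (trace : List String) (eventlist : List String) (datatraceindex : Int) (out : List (List Int)) : Prop := out = getsln_alt trace eventlist datatraceindex
instance (trace : List String) (eventlist : List String) (datatraceindex : Int) (out : List (List Int)) : Decidable (Spec_getsln trace eventlist datatraceindex out) := by unfold Spec_getsln; infer_instance

-- ===== CLAIM (what is proved, stated in full; the proofs are below) =====
def Claim_equal_getsln : Prop := ∀ (trace : List String) (eventlist : List String) (datatraceindex : Int), Dom_getsln trace eventlist datatraceindex → Spec_getsln trace eventlist datatraceindex (getsln trace eventlist datatraceindex)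

-- ===== LEMMAS AND PROOFS =====

-- the mathematical row both programs compute for a prefix l: column p carries the count of
-- eventlist[p] in l when p is the first occurrence of its event, 0 otherwise
def rrow (E l : List String) : List Int :=
  (List.range E.length).map
    (fun p => if PySem.List.index? E (E.getD p "") = some p then (PySem.List.count l (E.getD p "") : Int) else 0)

lemma zeros_foldl (m : Nat) :
    (List.range m).foldl (fun a _ => a ++ [(0 : Int)]) [] = List.replicate m 0 := by
  rw [PySem.List.foldl_append_singleton_eq_map (l := List.range m) (f := fun _ => (0 : Int)) (acc := [])]
  simp [List.map_const']

lemma idxSelfIff (E : List String) (p : Nat) (hp : p < E.length) :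
    PySem.List.index? E E[p] = some p ↔ E[p] ∉ E.take p := by
  rw [PySem.List.index?_eq_some_iff]
  constructor
  · rintro ⟨pre, suf, hE, hlen, hnot⟩
    generalize hv : E[p] = v at hE hnot ⊢
    have htake : E.take p = pre := by
      rw [hE, ← hlen, List.take_left]
    rw [htake]; exact hnot
  · intro hnot
    refine ⟨E.take p, E.drop (p + 1), ?_, by simp [List.length_take]; omega, hnot⟩
    rw [← List.drop_eq_getElem_cons hp, List.take_append_drop]

lemma setfoldGetElem (E l : List String) (es : List String) (ln : List Int)
    (hlen : ln.length = E.length) (p : Nat) :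
    (es.foldl (fun ln e =>
        match PySem.List.index? E e with
        | some k => ln.set k ((PySem.List.count l e : Int))
        | none => ln) ln)[p]? =
    if (∃ e ∈ es, PySem.List.index? E e = some p) then
      some ((PySem.List.count l (E.getD p "") : Int))
    else ln[p]? := by
  induction es generalizing ln with
  | nil => simp
  | cons e es ih =>
    simp only [List.foldl_cons]
    cases h : PySem.List.index? E e with
    | none =>
      rw [ih ln hlen]
      congr 1
      rw [eq_iff_iff, List.exists_mem_cons_iff]
      have he : e ∉ E := (PySem.List.index?_eq_none_iff _ _).mp h
      have hne : ¬ (PySem.List.index? E e = some p) := fun hq =>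
        he ((PySem.List.index?_isSome_iff _ _).mp (by rw [hq]; rfl))
      tauto
    | some k =>
      obtain ⟨hk, hEk, -⟩ := PySem.List.getElem_of_index?_eq_some h
      rw [ih (ln.set k _) (by simpa using hlen)]
      by_cases hex : ∃ e' ∈ es, PySem.List.index? E e' = some p
      · rw [if_pos hex, if_pos]
        obtain ⟨e', he', hi⟩ := hex
        exact ⟨e', List.mem_cons_of_mem _ he', hi⟩
      · rw [if_neg hex]
        by_cases hpk : p = k
        · subst hpk
          rw [if_pos (show ∃ e' ∈ e :: es, PySem.List.index? E e' = some p from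
              ⟨e, by simp, h⟩), List.getElem?_set_self (by omega)]
          have hgd : E.getD p "" = e := by
            simp [List.getD_eq_getElem?_getD, List.getElem?_eq_getElem hk, hEk]
          rw [hgd]
        · rw [List.getElem?_set_ne (by omega), if_neg]
          rintro ⟨e', he', hi⟩
          rcases List.mem_cons.mp he' with rfl | he'
          · rw [h] at hi; exact hpk (by injection hi; omega)
          · exact hex ⟨e', he', hi⟩

lemma rrowGetElem (E l : List String) (p : Nat) (hp : p < E.length) :
    (rrow E l)[p]? = some (if PySem.List.index? E (E.getD p "") = some p
      then (PySem.List.count l (E.getD p "") : Int) else 0) := by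
  simp only [rrow]
  rw [List.getElem?_map, List.getElem?_range hp, Option.map_some]

lemma existsIdxIff (E : List String) (p : Nat) (hp : p < E.length) :
    (∃ e ∈ E, PySem.List.index? E e = some p) ↔ PySem.List.index? E (E.getD p "") = some p := by
  have hgd : E.getD p "" = E[p] := by
    simp [List.getD_eq_getElem?_getD, List.getElem?_eq_getElem hp]
  rw [hgd]
  constructor
  · rintro ⟨e', _, h'⟩
    obtain ⟨hk, hEk, -⟩ := PySem.List.getElem_of_index?_eq_some h'
    exact hEk ▸ h'
  · intro h
    exact ⟨E[p], List.getElem_mem hp, h⟩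

lemma lineA_eq (E l : List String) :
    E.foldl (fun ln e =>
        match PySem.List.index? E e with
        | some k => ln.set k ((PySem.List.count l e : Int))
        | none => ln) (List.replicate E.length (0 : Int)) = rrow E l := by
  apply List.ext_getElem?
  intro p
  rw [setfoldGetElem E l E _ (by simp) p]
  by_cases hp : p < E.length
  · rw [rrowGetElem E l p hp]
    by_cases hi : PySem.List.index? E (E.getD p "") = some p
    · rw [if_pos ((existsIdxIff E p hp).2 hi), if_pos hi]
    · rw [if_neg (fun h => hi ((existsIdxIff E p hp).1 h)), if_neg hi,
        List.getElem?_replicate, if_pos hp]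
  · rw [if_neg, List.getElem?_replicate, if_neg hp]
    · simp only [rrow]
      rw [List.getElem?_map, List.getElem?_eq_none_iff.2 (by simpa using hp), Option.map_none]
    · rintro ⟨e', he', h'⟩
      obtain ⟨hk, -, -⟩ := PySem.List.getElem_of_index?_eq_some h'
      omega

lemma rowB_eq (E l : List String) :
    ((((PySem.List.enumerate E).map
        (fun pe => !((PySem.List.slice E none (some pe.1)).contains pe.2))).zip E).map
      (fun fe => if fe.1 then
          (l.foldl (fun d x => d.insert x (d.getD x 0 + 1)) PySem.Dict.empty).getD fe.2 0
        else 0)) = rrow E l := by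
  apply List.ext_getElem
  · simp [rrow, PySem.List.length_enumerate]
  intro p hp1 hp2
  have hp : p < E.length := by simpa [PySem.List.length_enumerate] using hp1
  have hgd : E.getD p "" = E[p] := by simp [List.getD_eq_getElem?_getD, List.getElem?_eq_getElem hp]
  rw [List.getElem_map, List.getElem_zip, List.getElem_map,
    PySem.List.getElem_enumerate]
  simp only [zero_add]
  have hslice : PySem.List.slice E none (some ((p : Nat) : Int)) = E.take p :=
    PySem.List.slice_to_natCast E p
  rw [hslice]
  have hcnt : (l.foldl (fun d x => d.insert x (d.getD x 0 + 1)) PySem.Dict.empty).getD E[p] 0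
      = (l.count E[p] : Int) := by
    rw [PySem.Dict.getD_foldl_insert_add_one]
    simp
  simp only [rrow, List.getElem_map, List.getElem_range, hgd]
  by_cases hfst : E[p] ∈ E.take p
  · rw [if_neg (by simp [hfst]), if_neg]
    rw [idxSelfIff E p hp]; simpa using hfst
  · rw [if_pos (by simp [hfst]), if_pos ((idxSelfIff E p hp).2 hfst),
      hcnt, PySem.List.count_eq]

lemma B_loop (tr E : List String) (dti : Int) (k : Nat) :
    (List.range k).foldl
      (fun (st : PySem.Dict String Int × List (List Int)) i =>
        let cnt := if i < tr.length then
            st.1.insert (tr.getD i "") (st.1.getD (tr.getD i "") 0 + 1)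
          else st.1
        let row := if (i : Int) = dti then List.replicate E.length (0 : Int)
          else (((PySem.List.enumerate E).map
              (fun pe => !((PySem.List.slice E none (some pe.1)).contains pe.2))).zip E).map
            (fun fe => if fe.1 then cnt.getD fe.2 0 else 0)
        (cnt, st.2 ++ [row]))
      (PySem.Dict.empty, []) =
    ((tr.take k).foldl (fun d x => d.insert x (d.getD x 0 + 1)) PySem.Dict.empty,
     (List.range k).map (fun (i : Nat) => if (i : Int) = dti then List.replicate E.length (0 : Int)
        else rrow E (tr.take (i + 1)))) := by
  induction k with
  | zero => simp
  | succ k ih =>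
    have hcnt : (if k < tr.length then
        ((tr.take k).foldl (fun d x => d.insert x (d.getD x 0 + 1)) (PySem.Dict.empty : PySem.Dict String Int)).insert
          (tr.getD k "") (((tr.take k).foldl (fun d x => d.insert x (d.getD x 0 + 1)) (PySem.Dict.empty : PySem.Dict String Int)).getD (tr.getD k "") 0 + 1)
        else (tr.take k).foldl (fun d x => d.insert x (d.getD x 0 + 1)) (PySem.Dict.empty : PySem.Dict String Int))
        = (tr.take (k + 1)).foldl (fun d x => d.insert x (d.getD x 0 + 1)) (PySem.Dict.empty : PySem.Dict String Int) := by
      by_cases hk : k < tr.length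
      · rw [if_pos hk]
        have h1 : tr.take (k + 1) = tr.take k ++ [tr[k]] := by
          rw [List.take_add_one, List.getElem?_eq_getElem hk]; rfl
        have h2 : tr.getD k "" = tr[k] := by
          simp [List.getD_eq_getElem?_getD, List.getElem?_eq_getElem hk]
        rw [h1, List.foldl_append, List.foldl_cons, List.foldl_nil, h2]
      · rw [if_neg hk, List.take_of_length_le (by omega), List.take_of_length_le (by omega)]
    rw [List.range_succ, List.foldl_append, List.foldl_cons, List.foldl_nil, ih]
    dsimp only
    rw [hcnt]
    rw [List.map_append, List.map_cons, List.map_nil]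
    simp only [Prod.mk.injEq, List.append_cancel_left_eq, List.cons.injEq, and_true, true_and]
    by_cases hd : (k : Int) = dti
    · simp [hd]
    · rw [if_neg hd, if_neg hd, rowB_eq]

lemma A_body_eq (dti : Int) (lz : List Int) (f : Nat → List Int) :
    (fun (sln : List (List Int)) (i : Nat) =>
        if (i : Int) ≠ dti then sln ++ [f i] else sln ++ [lz]) =
    (fun sln (i : Nat) => sln ++ [if (i : Int) ≠ dti then f i else lz]) := by
  funext sln i
  by_cases h : (i : Int) ≠ dti <;> simp [h]

theorem getsln_spec : Claim_equal_getsln := by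
  intro trace E dti _
  unfold Spec_getsln getsln getsln_alt
  simp only [zeros_foldl]
  rw [B_loop trace E dti (trace.length + 1)]
  have hA : ((List.range (trace.length + 1)).foldl
      (fun (sln : List (List Int)) (i : Nat) =>
        if (i : Int) ≠ dti then
          sln ++ [E.foldl (fun line e =>
              match PySem.List.index? E e with
              | some k => line.set k ((PySem.List.count (PySem.List.slice trace none (some ((i : Int) + 1))) e : Int))
              | none => line) (List.replicate E.length (0 : Int))]
        else sln ++ [List.replicate E.length (0 : Int)]) []) =
      (List.range (trace.length + 1)).map
        (fun (i : Nat) => if (i : Int) = dti then List.replicate E.length (0 : Int)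
          else rrow E (trace.take (i + 1))) := by
    rw [A_body_eq dti (List.replicate E.length (0 : Int))
      (fun (i : Nat) => E.foldl (fun line e =>
          match PySem.List.index? E e with
          | some k => line.set k ((PySem.List.count (PySem.List.slice trace none (some ((i : Int) + 1))) e : Int))
          | none => line) (List.replicate E.length (0 : Int)))]
    rw [PySem.List.foldl_append_singleton_eq_map, List.nil_append]
    apply List.map_congr_left
    intro i _
    by_cases hd : (i : Int) = dti
    · simp [hd]
    · rw [if_pos hd, if_neg hd]
      have hslice : PySem.List.slice trace none (some ((i : Int) + 1)) = trace.take (i + 1) := by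
        have : ((i : Int) + 1) = ((i + 1 : Nat) : Int) := by push_cast; ring
        rw [this, PySem.List.slice_to_natCast]
      rw [hslice, lineA_eq]
  rw [hA]
  congr 1
  simp [List.map_const']
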